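-- pv_equiv track=rewrite | github.com/dawoodaijaz97/Leetcode | maximize-ysum-by-picking-a-triplet-of-distinct-xvalues/solution.py | solve
-- ===== SOURCE A (Python) =====
-- from typing import List, Dict
--
-- def solve(x: List[int], y: List[int]) -> int:
--     # Dictionary to store the top 3 largest y values for each unique x value
--     max_y_values: Dict[int, List[int]] = {}
--
--     for xi, yi in zip(x, y):
--         if xi not in max_y_values:
--             max_y_values[xi] = []
--         # Insert yi into the sorted list of top 3 y values for this x
--         from bisect import insort
--         insort(max_y_values[xi], yi)
--         if len(max_y_values[xi]) > 3:
--             max_y_values[xi].pop(0)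
--
--     # Find the maximum sum of y values from three distinct x values
--     max_sum = -1
--     for xi, yi in zip(x, y):
--         # Get the top 2 y values for this x (excluding yi itself)
--         top_ys = max_y_values[xi][:-1]
--         if len(top_ys) == 2:
--             current_sum = yi + sum(top_ys)
--             max_sum = max(max_sum, current_sum)
--
--     return max_sum
-- ===== SOURCE B (Python) =====
-- from typing import List
--
-- def solve(x: List[int], y: List[int]) -> int:
--     # Group all y-values by x, then for each x seen at least 3 times take the
--     # sum of its 3 largest y-values; answer is the max of these, default -1.
--     groups = {}
--     for xi, yi in zip(x, y):
--         groups.setdefault(xi, []).append(yi)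
--     best = -1
--     for ys in groups.values():
--         if len(ys) >= 3:
--             best = max(best, sum(sorted(ys)[-3:]))
--     return best
-- ===== Notes on version B (the rewrite author's own statement) =====
-- stated objective: simpler
-- what changed: B drops A's bounded-insort top-3 bookkeeping and A's second pass over all (x,y) pairs (dict lookup + slice + sum per pair); instead it groups all y-values by x with setdefault/append and, per group seen at least 3 times, sums the 3 largest via sorted(ys)[-3:], taking the max with default -1; equal because A's stored list is exactly the 3 largest y's of its x and A's per-pair candidate yi + sum(two smaller stored) is maximized at the largest stored y.
import Mathlib
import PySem

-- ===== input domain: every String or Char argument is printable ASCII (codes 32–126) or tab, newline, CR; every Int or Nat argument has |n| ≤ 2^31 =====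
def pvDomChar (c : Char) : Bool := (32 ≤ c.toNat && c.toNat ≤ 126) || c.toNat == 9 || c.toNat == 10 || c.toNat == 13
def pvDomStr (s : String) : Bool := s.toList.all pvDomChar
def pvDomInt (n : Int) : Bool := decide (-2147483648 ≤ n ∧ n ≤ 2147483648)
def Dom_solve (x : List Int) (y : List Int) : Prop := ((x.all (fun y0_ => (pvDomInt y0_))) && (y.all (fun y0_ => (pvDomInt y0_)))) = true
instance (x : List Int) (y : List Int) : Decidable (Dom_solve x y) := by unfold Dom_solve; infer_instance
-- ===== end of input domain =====

-- B replaces A's bounded-insort top-3 dict and second pass over all pairs by: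
-- group all y by x, then per group of size ≥ 3 sum the 3 largest via sort+slice
-- (objective: simpler).

-- ===== PORT A =====
-- bisect.insort into a sorted list (insert after equal elements); exact on sorted lists
def insortA : List Int → Int → List Int
  | [], y => [y]
  | a :: t, y => if y < a then y :: a :: t else a :: insortA t y

-- one iteration of the first loop's body on the stored list: insort, then pop(0) if len > 3
def ins1 (l : List Int) (y : Int) : List Int :=
  if (insortA l y).length > 3 then (insortA l y).tail else insortA l y

-- A's first loop: dict x -> up-to-3 largest y values.
-- 'if xi not in d: d[xi] = []' followed by mutating d[xi] is d.modify xi [] (exact).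
def buildTop3 (x : List Int) (y : List Int) : PySem.Dict Int (List Int) :=
  (x.zip y).foldl (fun d p => d.modify p.1 [] (fun s => ins1 s p.2)) PySem.Dict.empty

def solve (x : List Int) (y : List Int) : Int :=
  let d := buildTop3 x y
  (x.zip y).foldl (fun ms p =>
    -- top_ys = max_y_values[xi][:-1]; the key is always present, so getD is exact;
    -- l[:-1] is List.dropLast (exact, hand-ported)
    let top_ys := (d.getD p.1 []).dropLast
    if top_ys.length == 2 then max ms (p.2 + top_ys.sum) else ms) (-1)

-- ===== PORT B =====
-- B's first loop: groups.setdefault(xi, []).append(yi), i.e. ALL y values per x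
def buildGroups (x : List Int) (y : List Int) : PySem.Dict Int (List Int) :=
  (x.zip y).foldl (fun d p => d.modify p.1 [] (fun s => s ++ [p.2])) PySem.Dict.empty

def solve_alt (x : List Int) (y : List Int) : Int :=
  (buildGroups x y).values.foldl (fun b ys =>
    -- sum(sorted(ys)[-3:]) : sort ascending, slice the last three, sum
    if 3 ≤ ys.length then
      max b (PySem.List.slice (PySem.List.sorted ys (fun v => v) false) (some (-3)) none).sum
    else b) (-1)

-- ===== PRECONDITION & SPEC =====
def Spec_solve (x : List Int) (y : List Int) (out : Int) : Prop := out = solve_alt x y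
instance (x : List Int) (y : List Int) (out : Int) : Decidable (Spec_solve x y out) := by unfold Spec_solve; infer_instance

-- ===== CLAIM (what is proved, stated in full; the proofs are below) =====
def Claim_equal_solve : Prop := ∀ (x : List Int) (y : List Int), Dom_solve x y → Spec_solve x y (solve x y)

-- ===== LEMMAS AND PROOFS =====

-- y-values stored under key k after processing the pair list P, as a pure function
def occY (P : List (Int × Int)) (k : Int) : List Int :=
  (P.filter (fun p => p.1 == k)).map Prod.snd

def top3 (ys : List Int) : List Int := ys.foldl ins1 []

theorem getD_build (P : List (Int × Int)) (d : PySem.Dict Int (List Int)) (k : Int) :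
    (P.foldl (fun d p => d.modify p.1 [] (fun s => ins1 s p.2)) d).getD k []
      = (occY P k).foldl ins1 (d.getD k []) := by
  induction P generalizing d with
  | nil => simp [occY]
  | cons p P ih =>
    simp only [List.foldl_cons, ih, occY, List.filter_cons]
    by_cases h : p.1 = k
    · simp [h]
    · simp [PySem.Dict.getD_modify, h, Ne.symm h]

theorem getD_buildTop3 (x y : List Int) (k : Int) :
    (buildTop3 x y).getD k [] = top3 (occY (x.zip y) k) := by
  simp [buildTop3, getD_build, top3, PySem.Dict.getD_empty]

theorem getD_buildGroups (x y : List Int) (k : Int) :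
    (buildGroups x y).getD k [] = occY (x.zip y) k := by
  unfold buildGroups occY
  rw [PySem.Dict.getD_foldl_modify_append]
  simp [PySem.Dict.getD_empty]

-- basic properties of insortA
theorem mem_insortA (l : List Int) (y a : Int) : a ∈ insortA l y ↔ a ∈ l ∨ a = y := by
  induction l with
  | nil => simp [insortA]
  | cons b t ih =>
    simp only [insortA]
    split_ifs <;> simp [ih] <;> tauto

theorem length_insortA (l : List Int) (y : Int) : (insortA l y).length = l.length + 1 := by
  induction l with
  | nil => simp [insortA]
  | cons b t ih => simp only [insortA]; split_ifs <;> simp [ih]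

theorem perm_insortA (l : List Int) (y : Int) : (insortA l y).Perm (y :: l) := by
  induction l with
  | nil => simp [insortA]
  | cons b t ih =>
    simp only [insortA]
    split_ifs
    · exact List.Perm.refl _
    · exact (ih.cons b).trans (List.Perm.swap y b t)

theorem sorted_insortA (l : List Int) (y : Int) (h : l.Pairwise (· ≤ ·)) :
    (insortA l y).Pairwise (· ≤ ·) := by
  induction l with
  | nil => simp [insortA]
  | cons b t ih =>
    simp only [insortA]
    rcases List.pairwise_cons.mp h with ⟨hb, ht⟩
    split_ifs with hy
    · refine List.pairwise_cons.mpr ⟨?_, h⟩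
      intro c hc
      rcases List.mem_cons.mp hc with rfl | hc
      · omega
      · exact le_trans (le_of_lt hy) (hb c hc)
    · refine List.pairwise_cons.mpr ⟨?_, ih ht⟩
      intro c hc
      rcases (mem_insortA t y c).mp hc with hc | rfl
      · exact hb c hc
      · omega

-- insortA across an append, split by where y lands
theorem insortA_append_of_forall (u v : List Int) (y : Int) (h : ∀ a ∈ u, ¬ y < a) :
    insortA (u ++ v) y = u ++ insortA v y := by
  induction u with
  | nil => simp
  | cons a t ih =>
    have ha : ¬ y < a := h a List.mem_cons_self
    simp only [List.cons_append, insortA, if_neg ha]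
    rw [ih (fun b hb => h b (List.mem_cons_of_mem _ hb))]

theorem insortA_append_of_exists (u v : List Int) (y : Int) (h : ∃ a ∈ u, y < a) :
    insortA (u ++ v) y = insortA u y ++ v := by
  induction u with
  | nil => obtain ⟨a, ha, _⟩ := h; cases ha
  | cons a t ih =>
    by_cases hy : y < a
    · simp [insortA, if_pos hy]
    · obtain ⟨c, hc, hyc⟩ := h
      rcases List.mem_cons.mp hc with rfl | hc
      · exact absurd hyc hy
      · simp only [List.cons_append, insortA, if_neg hy]
        rw [ih ⟨c, hc, hyc⟩]

-- last of a sorted list bounds every member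
theorem sorted_le_getLast? {l : List Int} (h : l.Pairwise (· ≤ ·)) {a m : Int}
    (ha : a ∈ l) (hm : l.getLast? = some m) : a ≤ m := by
  induction l with
  | nil => cases ha
  | cons b t ih =>
    rcases List.pairwise_cons.mp h with ⟨hb, ht⟩
    cases t with
    | nil =>
      simp at hm ha; omega
    | cons c u =>
      rw [List.getLast?_cons_cons] at hm
      have hmmem : m ∈ c :: u := List.mem_of_getLast? hm
      rcases List.mem_cons.mp ha with rfl | ha
      · exact hb m hmmem
      · exact ih ht ha hm

-- the invariant of A's first loop's stored list
theorem top3_inv (ys : List Int) :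
    (top3 ys).Pairwise (· ≤ ·) ∧ (top3 ys).length = min ys.length 3 ∧
    (∀ a ∈ top3 ys, a ∈ ys) ∧ (∀ a ∈ ys, ∀ m, (top3 ys).getLast? = some m → a ≤ m) := by
  induction ys using List.reverseRecOn with
  | nil => simp [top3]
  | append_singleton ys y ih =>
    obtain ⟨hs, hl, hmem, hlast⟩ := ih
    have hstep : top3 (ys ++ [y]) = ins1 (top3 ys) y := by
      simp [top3, List.foldl_append]
    set l := top3 ys with hldef
    have hlen3 : l.length ≤ 3 := by omega
    have hsort' := sorted_insortA l y hs
    have hlen' := length_insortA l y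
    constructor
    · -- sorted
      rw [hstep]; unfold ins1
      split_ifs with h
      · exact List.Pairwise.sublist (List.tail_sublist _) hsort'
      · exact hsort'
    refine ⟨?_, ?_, ?_⟩
    · -- length
      rw [hstep]; unfold ins1
      split_ifs with h <;>
        simp only [List.length_tail, List.length_append, List.length_singleton] <;> omega
    · -- membership
      intro a ha
      rw [hstep] at ha; unfold ins1 at ha
      have ha' : a ∈ insortA l y := by
        split_ifs at ha with h
        · exact List.mem_of_mem_tail ha
        · exact ha
      rcases (mem_insortA l y a).mp ha' with h | rfl
      · exact List.mem_append_left _ (hmem a h)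
      · exact List.mem_append_right _ List.mem_cons_self
    · -- last bounds everything seen so far
      intro a ha m hm
      have hm' : (insortA l y).getLast? = some m := by
        rw [hstep] at hm; unfold ins1 at hm
        split_ifs at hm with h
        · cases hins : insortA l y with
          | nil => rw [hins] at hm; simp at hm
          | cons b t =>
            rw [hins] at hm h
            have ht : t ≠ [] := by
              intro h0; rw [h0] at h; simp at h
            simp only [List.tail_cons] at hm
            exact List.mem_getLast?_cons hm
        · exact hm
      rcases List.mem_append.mp ha with ha | ha
      · have hne : l ≠ [] := by
          intro h0
          have : ys.length = 0 := by
            have := hl; rw [h0] at this; simp at this; omega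
          simp [List.length_eq_zero_iff.mp this] at ha
        obtain ⟨m0, hm0⟩ : ∃ m0, l.getLast? = some m0 := by
          cases h0 : l.getLast? with
          | none => exact absurd (List.getLast?_eq_none_iff.mp h0) hne
          | some m0 => exact ⟨m0, rfl⟩
        have h1 : a ≤ m0 := hlast a ha m0 hm0
        have hm0mem : m0 ∈ insortA l y :=
          (mem_insortA l y m0).mpr (Or.inl (List.mem_of_getLast? hm0))
        exact le_trans h1 (sorted_le_getLast? hsort' hm0mem hm')
      · simp only [List.mem_singleton] at ha
        exact ha ▸ sorted_le_getLast? hsort' ((mem_insortA l y y).mpr (Or.inr rfl)) hm'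

-- generic max-fold lemmas
theorem foldl_maxif {α : Type} (l : List α) (c : α → Bool) (f : α → Int) (a : Int) :
    l.foldl (fun a p => if c p then max a (f p) else a) a
      = ((l.filter c).map f).foldl max a := by
  induction l generalizing a with
  | nil => rfl
  | cons p l ih =>
    simp only [List.foldl_cons, List.filter_cons]
    by_cases h : c p <;> simp [h, ih]

theorem le_init_foldl_max (l : List Int) (a : Int) : a ≤ l.foldl max a := by
  induction l generalizing a with
  | nil => simp
  | cons b l ih => exact le_trans (le_max_left a b) (ih _)

theorem le_mem_foldl_max {l : List Int} {u : Int} (h : u ∈ l) (a : Int) :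
    u ≤ l.foldl max a := by
  induction l generalizing a with
  | nil => cases h
  | cons b l ih =>
    rcases List.mem_cons.mp h with rfl | h
    · exact le_trans (le_max_right a u) (le_init_foldl_max l _)
    · exact ih h _

theorem foldl_max_le {l : List Int} {a b : Int} (ha : a ≤ b) (h : ∀ u ∈ l, u ≤ b) :
    l.foldl max a ≤ b := by
  induction l generalizing a with
  | nil => exact ha
  | cons c l ih =>
    exact ih (max_le ha (h c List.mem_cons_self)) (fun u hu => h u (List.mem_cons_of_mem _ hu))

theorem foldl_max_cofinal {L1 L2 : List Int} (a : Int)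
    (h1 : ∀ u ∈ L1, ∃ v ∈ L2, u ≤ v) (h2 : ∀ v ∈ L2, ∃ u ∈ L1, v ≤ u) :
    L1.foldl max a = L2.foldl max a := by
  apply le_antisymm
  · refine foldl_max_le (le_init_foldl_max _ _) (fun u hu => ?_)
    obtain ⟨v, hv, huv⟩ := h1 u hu
    exact le_trans huv (le_mem_foldl_max hv _)
  · refine foldl_max_le (le_init_foldl_max _ _) (fun v hv => ?_)
    obtain ⟨u, hu, hvu⟩ := h2 v hv
    exact le_trans hvu (le_mem_foldl_max hu _)

theorem sum_eq_dropLast_add_getLast {l : List Int} {m : Int} (hm : l.getLast? = some m) :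
    l.sum = l.dropLast.sum + m := by
  have hne : l ≠ [] := by intro h0; rw [h0] at hm; simp at hm
  have hm2 : l.getLast hne = m := by
    rw [List.getLast?_eq_getLast hne] at hm; exact Option.some.inj hm
  conv_lhs => rw [← List.dropLast_append_getLast hne]
  rw [List.sum_append, hm2]; simp

-- keys of the dicts built by the two first loops
theorem keys_buildTop3 (x y : List Int) (k : Int) :
    k ∈ (buildTop3 x y).keys ↔ k ∈ (x.zip y).map Prod.fst := by
  unfold buildTop3
  rw [PySem.Dict.keys_foldl_modify_key (x.zip y) Prod.fst [] (fun _ p => fun s => ins1 s p.2)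
    PySem.Dict.empty, PySem.Dict.keys_empty, PySem.Set.update_nil_left, PySem.Set.mem_ofList]

theorem nodup_keys_buildTop3 (x y : List Int) : (buildTop3 x y).keys.Nodup := by
  unfold buildTop3
  exact PySem.Dict.nodup_keys_foldl_modify_key (x.zip y) Prod.fst [] (fun _ p => fun s => ins1 s p.2)
    PySem.Dict.empty (by rw [PySem.Dict.keys_empty]; exact List.nodup_nil)

theorem nodup_keys_buildGroups (x y : List Int) : (buildGroups x y).keys.Nodup := by
  unfold buildGroups
  exact PySem.Dict.nodup_keys_foldl_modify_key (x.zip y) Prod.fst [] (fun _ p => fun s => s ++ [p.2])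
    PySem.Dict.empty (by rw [PySem.Dict.keys_empty]; exact List.nodup_nil)

theorem keys_buildTop3_eq_keys_buildGroups (x y : List Int) :
    (buildTop3 x y).keys = (buildGroups x y).keys := by
  unfold buildTop3 buildGroups
  rw [PySem.Dict.keys_foldl_modify_key (x.zip y) Prod.fst [] (fun _ p => fun s => ins1 s p.2)
    PySem.Dict.empty,
    PySem.Dict.keys_foldl_modify_key (x.zip y) Prod.fst [] (fun _ p => fun s => s ++ [p.2])
    PySem.Dict.empty]

-- A's answer, re-expressed as a fold over the stored lists of its dict
theorem A_as_values (x y : List Int) :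
    solve x y = (buildTop3 x y).values.foldl
      (fun b l => if l.length == 3 then max b l.sum else b) (-1) := by
  unfold solve
  set d := buildTop3 x y with hd
  show (x.zip y).foldl (fun ms p =>
      if ((d.getD p.1 []).dropLast.length == 2) = true
      then max ms (p.2 + (d.getD p.1 []).dropLast.sum) else ms) (-1)
    = d.values.foldl (fun b l => if (l.length == 3) = true then max b l.sum else b) (-1)
  rw [foldl_maxif (x.zip y) (fun p => (d.getD p.1 []).dropLast.length == 2)
        (fun p => p.2 + (d.getD p.1 []).dropLast.sum) (-1),
      foldl_maxif d.values (fun l => l.length == 3) List.sum (-1)]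
  apply foldl_max_cofinal
  · -- every per-pair candidate is bounded by a per-key candidate
    intro u hu
    simp only [List.mem_map, List.mem_filter] at hu
    obtain ⟨p, ⟨hpP, hgate⟩, hu⟩ := hu
    have hD := getD_buildTop3 x y p.1
    obtain ⟨hs, hl, hmem, hlast⟩ := top3_inv (occY (x.zip y) p.1)
    rw [← hd] at hD
    have hlen3 : (d.getD p.1 []).length = 3 := by
      have := @List.length_dropLast _ (d.getD p.1 [])
      simp only [beq_iff_eq] at hgate
      have h0 : (d.getD p.1 []).length ≠ 0 := by
        intro h0
        rw [List.length_eq_zero_iff.mp h0] at hgate; simp at hgate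
      omega
    have hne : d.getD p.1 [] ≠ [] := by
      intro h0; rw [h0] at hlen3; simp at hlen3
    obtain ⟨m, hm⟩ : ∃ m, (d.getD p.1 []).getLast? = some m :=
      ⟨_, List.getLast?_eq_getLast hne⟩
    have hocc : p.2 ∈ occY (x.zip y) p.1 := by
      unfold occY
      exact List.mem_map_of_mem (List.mem_filter.mpr ⟨hpP, by simp⟩)
    have hp2m : p.2 ≤ m := hlast p.2 hocc m (by rw [← hD]; exact hm)
    refine ⟨(d.getD p.1 []).sum, ?_, ?_⟩
    · simp only [List.mem_map, List.mem_filter]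
      refine ⟨d.getD p.1 [], ⟨?_, by simp [hlen3]⟩, rfl⟩
      rw [PySem.Dict.values_eq_map_keys d (nodup_keys_buildTop3 x y) []]
      exact List.mem_map_of_mem ((keys_buildTop3 x y p.1).mpr (List.mem_map_of_mem hpP))
    · rw [← hu, sum_eq_dropLast_add_getLast hm]; omega
  · -- every per-key candidate is attained by a per-pair candidate
    intro v hv
    simp only [List.mem_map, List.mem_filter] at hv
    obtain ⟨l, ⟨hlv, hl3⟩, hv⟩ := hv
    rw [PySem.Dict.values_eq_map_keys d (nodup_keys_buildTop3 x y) []] at hlv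
    obtain ⟨k, hk, hlk⟩ := List.mem_map.mp hlv
    have hD := getD_buildTop3 x y k
    rw [← hd] at hD
    obtain ⟨hs, hllen, hmem, hlast⟩ := top3_inv (occY (x.zip y) k)
    simp only [beq_iff_eq] at hl3
    have hne : l ≠ [] := by intro h0; rw [h0] at hl3; simp at hl3
    obtain ⟨m, hm⟩ : ∃ m, l.getLast? = some m := ⟨_, List.getLast?_eq_getLast hne⟩
    have hmocc : m ∈ occY (x.zip y) k := by
      apply hmem
      rw [← hD, hlk]; exact List.mem_of_getLast? hm
    unfold occY at hmocc
    obtain ⟨p, hpf, hpm⟩ := List.mem_map.mp hmocc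
    obtain ⟨hpP, hpk⟩ := List.mem_filter.mp hpf
    have hpk' : p.1 = k := by simpa using hpk
    refine ⟨v, ?_, le_refl v⟩
    simp only [List.mem_map, List.mem_filter]
    refine ⟨p, ⟨hpP, ?_⟩, ?_⟩
    · rw [hpk', hlk]
      simp [List.length_dropLast, hl3]
    · rw [hpk', hlk, ← hv, hpm, sum_eq_dropLast_add_getLast hm]; omega

-- B-side: sorted(ys) grows by one bisect-style insertion when ys grows by one element
theorem sorted_append_singleton (ys : List Int) (y : Int) :
    PySem.List.sorted (ys ++ [y]) (fun v => v) false
      = insortA (PySem.List.sorted ys (fun v => v) false) y := by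
  apply PySem.List.sorted_id_eq_of_perm_of_pairwise
  · exact (perm_insortA _ y).trans
      (((PySem.List.sorted_perm ys (fun v => v) false).cons y).trans
        (List.perm_append_singleton y ys).symm)
  · exact sorted_insortA _ y (by simpa using PySem.List.sorted_pairwise ys (fun v => v))

-- inserting below a block of three larger elements, then popping, keeps that block
theorem drop_insortA_split (u v : List Int) (y : Int)
    (huv : ∀ a ∈ u, ∀ b ∈ v, a ≤ b) (hvl : v.length = 3) :
    (insortA (u ++ v) y).drop (u.length + 1) = (insortA v y).tail := by
  by_cases hex : ∃ a ∈ u, y < a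
  · -- y is inserted inside u; the dropped prefix swallows it and all of u
    obtain ⟨a, ha, hya⟩ := hex
    have hvlt : ∀ b ∈ v, y < b := fun b hb => lt_of_lt_of_le hya (huv a ha b hb)
    have hins_v : insortA v y = y :: v := by
      cases hvv : v with
      | nil => rw [hvv] at hvl; simp at hvl
      | cons b t =>
        have hb : y < b := hvlt b (by rw [hvv]; exact List.mem_cons_self)
        simp [insortA, hb]
    have h1 : List.drop (u.length + 1) (insortA u y) = [] :=
      List.drop_eq_nil_of_le (by rw [length_insortA])
    have h2 : u.length + 1 - (insortA u y).length = 0 := by rw [length_insortA]; omega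
    rw [insortA_append_of_exists u v y ⟨a, ha, hya⟩, List.drop_append, h1, h2,
      List.drop_zero, List.nil_append, hins_v, List.tail_cons]
  · -- y lands in the last-three zone
    push_neg at hex
    rw [insortA_append_of_forall u v y (fun a ha => not_lt.mpr (hex a ha))]
    have h1 : List.drop (u.length + 1) u = [] := List.drop_eq_nil_of_le (by omega)
    have h2 : u.length + 1 - u.length = 1 := by omega
    rw [List.drop_append, h1, h2, List.nil_append, List.drop_one]

-- the crux: dropping all but the last 3 commutes with one insertion step
theorem drop_insortA_step (s : List Int) (y : Int) (hs : s.Pairwise (· ≤ ·)) :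
    (insortA s y).drop (s.length + 1 - 3) = ins1 (s.drop (s.length - 3)) y := by
  by_cases hn : s.length ≤ 2
  · have h1 : s.length + 1 - 3 = 0 := by omega
    have h2 : s.length - 3 = 0 := by omega
    rw [h1, h2, List.drop_zero, List.drop_zero]
    unfold ins1
    rw [if_neg]
    rw [length_insortA]; omega
  · have hvl : (s.drop (s.length - 3)).length = 3 := by rw [List.length_drop]; omega
    have huv : ∀ a ∈ s.take (s.length - 3), ∀ b ∈ s.drop (s.length - 3), a ≤ b := by
      have hs' := hs
      conv at hs' => rw [← List.take_append_drop (s.length - 3) s]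
      exact (List.pairwise_append.mp hs').2.2
    have hul : (s.take (s.length - 3)).length = s.length - 3 := by
      rw [List.length_take]; omega
    have := drop_insortA_split (s.take (s.length - 3)) (s.drop (s.length - 3)) y huv hvl
    rw [hul] at this
    have hi : s.length + 1 - 3 = s.length - 3 + 1 := by omega
    have hrhs : ins1 (s.drop (s.length - 3)) y = (insortA (s.drop (s.length - 3)) y).tail := by
      unfold ins1
      rw [if_pos]
      rw [length_insortA]; omega
    rw [hi, hrhs, ← this]
    conv_lhs => rw [← List.take_append_drop (s.length - 3) s]
    rw [List.take_append_drop]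

theorem top3_eq_drop_sorted (ys : List Int) :
    top3 ys = (PySem.List.sorted ys (fun v => v) false).drop (ys.length - 3) := by
  induction ys using List.reverseRecOn with
  | nil => decide
  | append_singleton ys y ih =>
    have hstep : top3 (ys ++ [y]) = ins1 (top3 ys) y := by
      simp [top3, List.foldl_append]
    have hpw : (PySem.List.sorted ys (fun v => v) false).Pairwise (· ≤ ·) := by
      simpa using PySem.List.sorted_pairwise ys (fun v => v)
    have hlen : (PySem.List.sorted ys (fun v => v) false).length = ys.length :=
      PySem.List.length_sorted ys (fun v => v) false
    rw [hstep, ih, sorted_append_singleton]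
    have := drop_insortA_step (PySem.List.sorted ys (fun v => v) false) y hpw
    rw [hlen] at this
    rw [List.length_append, List.length_singleton, ← this]

theorem solve_eq (x y : List Int) : solve x y = solve_alt x y := by
  rw [A_as_values]
  unfold solve_alt
  rw [PySem.Dict.values_eq_map_keys (buildTop3 x y) (nodup_keys_buildTop3 x y) [],
      PySem.Dict.values_eq_map_keys (buildGroups x y) (nodup_keys_buildGroups x y) [],
      keys_buildTop3_eq_keys_buildGroups, List.foldl_map, List.foldl_map]
  have hstep : (fun (b : Int) (k : Int) =>
        if ((buildTop3 x y).getD k []).length == 3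
        then max b ((buildTop3 x y).getD k []).sum else b)
      = (fun (b : Int) (k : Int) =>
        if 3 ≤ ((buildGroups x y).getD k []).length then
          max b (PySem.List.slice
            (PySem.List.sorted ((buildGroups x y).getD k []) (fun v => v) false)
            (some (-3)) none).sum
        else b) := by
    funext b k
    rw [getD_buildTop3, getD_buildGroups]
    set occ := occY (x.zip y) k with hocc
    obtain ⟨_, hlen, _, _⟩ := top3_inv occ
    rw [PySem.List.slice_from_neg_ofNat _ 3 (by norm_num),
        PySem.List.length_sorted, ← top3_eq_drop_sorted]
    by_cases h3 : 3 ≤ occ.length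
    · rw [if_pos (by simp [hlen]; omega), if_pos h3]
    · rw [if_neg (by simp [hlen]; omega), if_neg h3]
  rw [hstep]

-- ===== VERDICT (by name: the statement is the Claim_ definition above) =====
theorem solve_spec : Claim_equal_solve := by
  intro x y _
  unfold Spec_solve
  exact solve_eq x y
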